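-- pv_equiv track=rewrite | github.com/decordoba/coding-problems | interviews/decipher_phrase.py | split_in_words
-- ===== SOURCE A (Python) =====
-- def split_in_words(text):
--     """Handle chars that are not spaces on split."""
--     words = text.split(" ")
--     split = []
--     for word in words:
--         if word.isalnum():
--             split.append(word)
--             continue
--         t = ""
--         for c in word:
--             if c.isalnum():
--                 t += c
--             else:
--                 if len(t) > 0:
--                     split.append(t)
--                 t = ""
--         if len(t) > 0:
--             split.append(t)
--     return split
-- ===== SOURCE B (Python) =====
-- def split_in_words(text):
--     """Handle chars that are not spaces on split."""
--     res = []
--     i, n = 0, len(text)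
--     while i < n:
--         if text[i].isalnum():
--             j = i + 1
--             while j < n and text[j].isalnum():
--                 j += 1
--             res.append(text[i:j])
--             i = j
--         else:
--             i += 1
--     return res
-- ===== Notes on version B (the rewrite author's own statement) =====
-- stated objective: simpler
-- what changed: Replaced A's split-on-space pass plus per-word isalnum fast-path and character-accumulator rescans by a single index scan over the string that slices out each maximal alphanumeric run directly.
import Mathlib
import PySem

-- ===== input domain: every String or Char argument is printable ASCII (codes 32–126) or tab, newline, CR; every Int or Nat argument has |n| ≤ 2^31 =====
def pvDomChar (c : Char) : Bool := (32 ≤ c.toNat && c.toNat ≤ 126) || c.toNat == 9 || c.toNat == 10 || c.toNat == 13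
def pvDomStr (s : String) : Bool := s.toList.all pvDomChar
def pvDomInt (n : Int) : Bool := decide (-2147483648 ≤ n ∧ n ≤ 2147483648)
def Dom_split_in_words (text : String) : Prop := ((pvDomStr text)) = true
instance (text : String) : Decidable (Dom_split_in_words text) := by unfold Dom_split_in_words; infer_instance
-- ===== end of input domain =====

-- B replaces A's split(" ")-then-rescan nesting by a single index scan that slices out
-- each maximal alphanumeric run directly (objective: simpler decomposition, same cost).


-- ===== PORT A =====
-- A's inner character loop: state = (split, t)
def aStep (p : List (List Char) × List Char) (c : Char) : List (List Char) × List Char :=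
  if PySem.Chars.isalnum c then (p.1, p.2 ++ [c])
  else (if p.2.length > 0 then p.1 ++ [p.2] else p.1, ([] : List Char))

-- A's outer loop body, one word of text.split(" ")
def aWord (split : List (List Char)) (word : List Char) : List (List Char) :=
  if PySem.Chars.strIsalnum word then split ++ [word]
  else
    let r := word.foldl aStep (split, ([] : List Char))
    if r.2.length > 0 then r.1 ++ [r.2] else r.1

def split_in_words (text : String) : List String :=
  ((PySem.Chars.splitOn text.toList [' ']).foldl aWord []).map String.ofList

-- ===== PORT B =====
-- B's inner while: j advances over alphanumeric characters
def bScan (cs : List Char) (j : Nat) : Nat :=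
  if h : j < cs.length then
    (if PySem.Chars.isalnum cs[j] then bScan cs (j + 1) else j)
  else j
termination_by cs.length - j

-- needed for bGo's termination
theorem le_bScan (cs : List Char) (j : Nat) : j ≤ bScan cs j := by
  fun_induction bScan cs j with
  | case1 j h halnum ih => exact Nat.le_trans (Nat.le_succ j) ih
  | case2 j h halnum => exact Nat.le_refl j
  | case3 j h => exact Nat.le_refl j

-- B's outer while over the index i; text[i:j] is a Python slice
def bGo (cs : List Char) (i : Nat) : List (List Char) :=
  if h : i < cs.length then
    if PySem.Chars.isalnum cs[i] then
      PySem.List.slice cs (some (i : Int)) (some ((bScan cs (i + 1) : Nat) : Int))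
        :: bGo cs (bScan cs (i + 1))
    else bGo cs (i + 1)
  else []
termination_by cs.length - i
decreasing_by
  · have := le_bScan cs (i + 1); omega
  · omega

def split_in_words_alt (text : String) : List String :=
  (bGo text.toList 0).map String.ofList

-- ===== PRECONDITION & SPEC =====
def Spec_split_in_words (text : String) (out : List String) : Prop := out = split_in_words_alt text
instance (text : String) (out : List String) : Decidable (Spec_split_in_words text out) := by unfold Spec_split_in_words; infer_instance

-- ===== CLAIM (what is proved, stated in full; the proofs are below) =====
def Claim_equal_split_in_words : Prop := ∀ (text : String), Dom_split_in_words text → Spec_split_in_words text (split_in_words text)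

-- ===== LEMMAS AND PROOFS =====

-- the common specification: maximal alphanumeric runs, with pending run t
def tokAux : List Char → List Char → List (List Char)
  | t, [] => if t.length > 0 then [t] else []
  | t, c :: cs =>
    if PySem.Chars.isalnum c then tokAux (t ++ [c]) cs
    else (if t.length > 0 then [t] else []) ++ tokAux [] cs

-- unfueled single-space split (reverse-accumulator form of PySem.Chars.splitOn.go)
def mySplit : List Char → List Char → List (List Char)
  | [], cur => [cur.reverse]
  | c :: rest, cur => if c = ' ' then cur.reverse :: mySplit rest [] else mySplit rest (c :: cur)

theorem go_eq (fuel : Nat) : ∀ (l cur : List Char) (acc : List (List Char)), l.length < fuel →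
    PySem.Chars.splitOn.go [' '] fuel l cur acc = acc.reverse ++ mySplit l cur := by
  induction fuel with
  | zero => intro l cur acc h; omega
  | succ fuel ih =>
    intro l cur acc h
    cases l with
    | nil => simp [PySem.Chars.splitOn.go, mySplit]
    | cons c rest =>
      rw [PySem.Chars.splitOn.go]
      by_cases hc : c = ' '
      · subst hc
        simp only [List.isPrefixOf, BEq.rfl, Bool.true_and, if_pos, List.length_cons,
          List.drop_succ_cons, List.length_nil, List.drop_zero]
        rw [ih rest [] (cur.reverse :: acc) (by simpa using Nat.lt_of_succ_lt_succ h)]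
        simp [mySplit]
      · have : ([' '].isPrefixOf (c :: rest)) = false := by
          simp [List.isPrefixOf]; exact fun hh => (hc hh.symm).elim
        rw [if_neg (by simp [this])]
        rw [ih rest (c :: cur) acc (by simpa using Nat.lt_of_succ_lt_succ h)]
        simp [mySplit, hc]

theorem splitOn_eq (cs : List Char) : PySem.Chars.splitOn cs [' '] = mySplit cs [] := by
  unfold PySem.Chars.splitOn
  rw [go_eq (cs.length + 1) cs [] [] (by omega)]
  simp

theorem flush_foldl : ∀ (word : List Char) (split : List (List Char)) (t : List Char),
    (if (word.foldl aStep (split, t)).2.length > 0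
     then (word.foldl aStep (split, t)).1 ++ [(word.foldl aStep (split, t)).2]
     else (word.foldl aStep (split, t)).1) = split ++ tokAux t word := by
  intro word
  induction word with
  | nil => intro split t; simp only [List.foldl_nil, tokAux]; split_ifs <;> simp
  | cons c cs ih =>
    intro split t
    by_cases hc : PySem.Chars.isalnum c
    · simp only [List.foldl_cons, aStep, hc, if_true, tokAux, ih]
    · simp only [List.foldl_cons, aStep, hc, if_false, tokAux, ih, Bool.false_eq_true]
      split_ifs <;> simp

theorem tokAux_all_alnum : ∀ (w t : List Char), w.all PySem.Chars.isalnum →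
    tokAux t w = if (t ++ w).length > 0 then [t ++ w] else [] := by
  intro w
  induction w with
  | nil => intro t _; simp [tokAux]
  | cons c cs ih =>
    intro t hall
    simp only [List.all_cons, Bool.and_eq_true] at hall
    simp only [tokAux, hall.1, if_true, ih _ hall.2]
    simp

theorem aWord_eq (split : List (List Char)) (word : List Char) :
    aWord split word = split ++ tokAux [] word := by
  unfold aWord
  by_cases h : PySem.Chars.strIsalnum word
  · have h1 : word ≠ [] := by
      intro hw; subst hw; simp [PySem.Chars.strIsalnum] at h
    have h2 : word.all PySem.Chars.isalnum = true := by
      unfold PySem.Chars.strIsalnum at h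
      exact ((Bool.and_eq_true _ _).mp h).2
    rw [if_pos h, tokAux_all_alnum word [] h2]
    simp only [List.nil_append]
    rw [if_pos (by cases word with | nil => exact absurd rfl h1 | cons a b => simp)]
  · rw [if_neg h]
    exact flush_foldl word split []

theorem foldl_aWord : ∀ (words : List (List Char)) (split : List (List Char)),
    words.foldl aWord split = split ++ words.flatMap (tokAux []) := by
  intro words
  induction words with
  | nil => intro split; simp
  | cons w ws ih => intro split; simp [List.foldl_cons, ih, aWord_eq]

theorem tok_space (u v : List Char) : ∀ t, tokAux t (u ++ ' ' :: v) = tokAux t u ++ tokAux [] v := by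
  induction u with
  | nil =>
    intro t
    have hsp : PySem.Chars.isalnum ' ' = false := by decide
    simp only [List.nil_append, tokAux, hsp, Bool.false_eq_true, if_false]
  | cons c u' ih =>
    intro t
    by_cases hc : PySem.Chars.isalnum c
    · simp only [List.cons_append, tokAux, hc, if_true, ih]
    · simp only [List.cons_append, tokAux, hc, Bool.false_eq_true, if_false, ih, List.append_assoc]

theorem mySplit_tok : ∀ (cs cur : List Char),
    (mySplit cs cur).flatMap (tokAux []) = tokAux [] (cur.reverse ++ cs) := by
  intro cs
  induction cs with
  | nil => intro cur; simp [mySplit]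
  | cons c rest ih =>
    intro cur
    by_cases hc : c = ' '
    · subst hc
      rw [show mySplit (' ' :: rest) cur = cur.reverse :: mySplit rest [] from by simp [mySplit]]
      rw [List.flatMap_cons, ih [], tok_space cur.reverse rest []]
      simp
    · simp only [mySplit, if_neg hc, ih (c :: cur), List.reverse_cons, List.append_assoc,
        List.cons_append, List.nil_append]

theorem a_eq_tok (text : String) :
    split_in_words text = (tokAux [] text.toList).map String.ofList := by
  unfold split_in_words
  rw [splitOn_eq, foldl_aWord]
  rw [show ((mySplit text.toList []).flatMap (tokAux [])) = tokAux [] text.toList from by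
    simpa using mySplit_tok text.toList []]
  simp

theorem tw_take (p : Char → Bool) : ∀ (l : List Char), List.take (l.takeWhile p).length l = l.takeWhile p := by
  intro l; induction l with
  | nil => simp
  | cons c cs ih => by_cases h : p c <;> simp [h, ih]

theorem tw_drop (p : Char → Bool) : ∀ (l : List Char), List.drop (l.takeWhile p).length l = l.dropWhile p := by
  intro l; induction l with
  | nil => simp
  | cons c cs ih => by_cases h : p c <;> simp [h, ih]

theorem bScan_eq (cs : List Char) (j : Nat) :
    bScan cs j = j + ((cs.drop j).takeWhile PySem.Chars.isalnum).length := by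
  fun_induction bScan cs j with
  | case1 j h halnum ih =>
    rw [ih, List.drop_eq_getElem_cons h, List.takeWhile_cons, if_pos halnum]
    simp only [List.length_cons]
    omega
  | case2 j h halnum =>
    rw [List.drop_eq_getElem_cons h, List.takeWhile_cons]
    simp [halnum]
  | case3 j h =>
    rw [List.drop_of_length_le (by omega)]
    simp

theorem tokAux_run : ∀ (cs t : List Char), t ≠ [] →
    tokAux t cs = (t ++ cs.takeWhile PySem.Chars.isalnum)
      :: tokAux [] (cs.dropWhile PySem.Chars.isalnum) := by
  intro cs
  induction cs with
  | nil =>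
    intro t ht
    simp only [tokAux, List.takeWhile_nil, List.dropWhile_nil, List.append_nil]
    rw [if_pos (by cases t with | nil => exact absurd rfl ht | cons a b => simp)]
    simp
  | cons c cs' ih =>
    intro t ht
    by_cases hc : PySem.Chars.isalnum c
    · simp only [tokAux, hc, if_true, List.takeWhile_cons, List.dropWhile_cons]
      rw [ih (t ++ [c]) (by simp)]
      simp
    · simp only [tokAux, hc, Bool.false_eq_true, if_false, List.takeWhile_cons,
        List.dropWhile_cons, List.append_nil, List.nil_append]
      rw [if_pos (by cases t with | nil => exact absurd rfl ht | cons a b => simp)]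
      simp

theorem bGo_eq (cs : List Char) (i : Nat) : bGo cs i = tokAux [] (cs.drop i) := by
  fun_induction bGo cs i with
  | case1 i h halnum ih =>
    have hs := bScan_eq cs (i + 1)
    rw [PySem.List.slice_natCast, ih, hs]
    rw [List.drop_eq_getElem_cons h]
    rw [show (i + 1 + ((cs.drop (i + 1)).takeWhile PySem.Chars.isalnum).length - i)
        = ((cs.drop (i + 1)).takeWhile PySem.Chars.isalnum).length + 1 from by omega]
    rw [List.take_succ_cons, tw_take]
    rw [show tokAux [] (cs[i] :: cs.drop (i + 1)) = tokAux [cs[i]] (cs.drop (i + 1)) from by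
      simp [tokAux, halnum]]
    rw [tokAux_run _ [cs[i]] (by simp)]
    simp only [List.singleton_append]
    rw [← tw_drop PySem.Chars.isalnum (List.drop (i + 1) cs), List.drop_drop]
  | case2 i h halnum ih =>
    rw [ih]
    conv_rhs => rw [List.drop_eq_getElem_cons h]
    simp [tokAux, halnum]
  | case3 i h =>
    rw [List.drop_of_length_le (by omega)]
    simp [tokAux]

theorem b_eq_tok (text : String) :
    split_in_words_alt text = (tokAux [] text.toList).map String.ofList := by
  unfold split_in_words_alt
  rw [bGo_eq]
  simp

-- ===== VERDICT (by name: the statement is the Claim_ definition above) =====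
theorem split_in_words_spec : Claim_equal_split_in_words := by
  intro text _
  unfold Spec_split_in_words
  rw [a_eq_tok, b_eq_tok]
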